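-- pv_equiv track=rewrite | github.com/Lingxianwen/NeuPRE | DynPRE-raw/DynPRE/DynPRE.py | get_nonzero_range
-- ===== SOURCE A (Python) =====
-- from typing import Dict, List, Optional, Tuple
--
-- def get_nonzero_range(a: List) -> List[Tuple]:
--     # Compute list "b" by replacing any non-zero value of "a" with 1
--     b = list(map(int, [i != 0 for i in a]))
--
--     # Compute ranges of 0 and ranges of 1, and only record ranges of 1
--     idx = []  # result list of tuples
--     start = 0  # index of first element of each range of zeros or non-zeros
--     for n in range(len(b)):
--         if (n + 1 == len(b)) or (b[n] != b[n + 1]):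
--             # Here: EITHER it is the last value of the list
--             #       OR a new range starts at index n+1
--             if b[start]:
--                 idx.append((start, n))
--             start = n + 1
--
--     return idx
-- ===== SOURCE B (Python) =====
-- from typing import Dict, List, Optional, Tuple
--
-- def get_nonzero_range(a: List) -> List[Tuple]:
--     # Two staged passes on a different structure: first collect the list of
--     # indices of non-zero elements, then split that index list wherever
--     # consecutive indices are not adjacent (a "gap"); each chunk is one range.
--     nz = [i for i, x in enumerate(a) if x != 0]
--     idx = []
--     start = None
--     prev = None
--     for i in nz:
--         if prev is None or i != prev + 1:
--             if prev is not None: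
--                 idx.append((start, prev))
--             start = i
--         prev = i
--     if prev is not None:
--         idx.append((start, prev))
--     return idx
-- ===== Notes on version B (the rewrite author's own statement) =====
-- stated objective: faster
-- what changed: Instead of segmenting the array itself (A's 0/1 helper list plus per-index neighbour comparison), B first extracts the list of non-zero indices and then splits that index list at gaps (consecutive indices that are not adjacent), emitting one (start, prev) pair per chunk.
import Mathlib
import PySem

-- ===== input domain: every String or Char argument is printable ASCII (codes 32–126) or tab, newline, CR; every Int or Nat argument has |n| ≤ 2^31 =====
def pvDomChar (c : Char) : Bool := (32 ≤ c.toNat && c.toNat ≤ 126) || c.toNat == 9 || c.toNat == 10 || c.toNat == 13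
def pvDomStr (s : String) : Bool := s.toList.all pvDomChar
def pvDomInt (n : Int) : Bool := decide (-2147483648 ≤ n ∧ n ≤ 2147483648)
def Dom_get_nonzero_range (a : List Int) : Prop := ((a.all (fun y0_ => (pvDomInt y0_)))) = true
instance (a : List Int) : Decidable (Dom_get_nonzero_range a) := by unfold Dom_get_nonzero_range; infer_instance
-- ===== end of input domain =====

-- B replaces A's array segmentation (0/1 helper list + per-index neighbour
-- comparison) with two staged passes: extract the non-zero index list, then
-- split it at gaps; same O(n), measured constant-factor faster (no per-index
-- list indexing in the second pass).

-- ===== PORT A =====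
-- b = list(map(int, [i != 0 for i in a]))
def pvAf (i : Int) : Int := if i ≠ 0 then 1 else 0

-- the body of A's for-loop over n (state = (idx, start)); Python's short-circuit
-- `or` means b[n+1] is only compared when n+1 < len(b), so the default of pyGetD
-- at n+1 = len(b) is never the deciding value
def pvAbody (b : List Int) (st : List (Int × Int) × Int) (n : Int) : List (Int × Int) × Int :=
  if n + 1 = (b.length : Int) ∨ PySem.List.pyGetD b n 0 ≠ PySem.List.pyGetD b (n + 1) 0 then
    (if PySem.List.pyGetD b st.2 0 ≠ 0 then (st.1 ++ [(st.2, n)], n + 1) else (st.1, n + 1))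
  else st

def get_nonzero_range (a : List Int) : List (Int × Int) :=
  let b := a.map pvAf
  ((PySem.List.pyRange 0 (b.length : Int) 1).foldl (pvAbody b) ([], 0)).1

-- ===== PORT B =====
-- body of B's `for i in nz` loop; the state's Option component bundles the two
-- Python variables (start, prev), which are None / set together
def pvBstep (st : List (Int × Int) × Option (Int × Int)) (i : Int) :
    List (Int × Int) × Option (Int × Int) :=
  match st.2 with
  | none => (st.1, some (i, i))
  | some (s, p) => if i ≠ p + 1 then (st.1 ++ [(s, p)], some (i, i)) else (st.1, some (s, i))

-- the trailing `if prev is not None: idx.append((start, prev))`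
def pvFlush (st : List (Int × Int) × Option (Int × Int)) : List (Int × Int) :=
  match st.2 with
  | none => st.1
  | some (s, p) => st.1 ++ [(s, p)]

def get_nonzero_range_alt (a : List Int) : List (Int × Int) :=
  -- nz = [i for i, x in enumerate(a) if x != 0]
  let nz : List Int := ((PySem.List.enumerate a 0).filter (fun p => decide (p.2 ≠ 0))).map Prod.fst
  pvFlush (nz.foldl pvBstep ([], none))

-- ===== PRECONDITION & SPEC =====
def Spec_get_nonzero_range (a : List Int) (out : List (Int × Int)) : Prop := out = get_nonzero_range_alt a
instance (a : List Int) (out : List (Int × Int)) : Decidable (Spec_get_nonzero_range a out) := by unfold Spec_get_nonzero_range; infer_instance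

-- ===== CLAIM (what is proved, stated in full; the proofs are below) =====
def Claim_equal_get_nonzero_range : Prop := ∀ (a : List Int), Dom_get_nonzero_range a → Spec_get_nonzero_range a (get_nonzero_range a)

-- ===== LEMMAS AND PROOFS =====

-- proof-side bridge: run-peeling characterisation both ports are reduced to
def pvRunGo (xs : List Int) (i : Int) : List (Int × Int) :=
  match xs with
  | [] => []
  | x :: rest =>
    let run := rest.takeWhile (fun y => decide (y ≠ 0) == decide (x ≠ 0))
    let tail := rest.dropWhile (fun y => decide (y ≠ 0) == decide (x ≠ 0))
    let j := i + 1 + (run.length : Int)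
    if x ≠ 0 then (i, j - 1) :: pvRunGo tail j else pvRunGo tail j
termination_by xs.length
decreasing_by
  all_goals exact Nat.lt_succ_of_le (List.length_dropWhile_le _ _)

lemma pvAf_eq_imp_ne_iff {x y : Int} (h : pvAf y = pvAf x) : (y ≠ 0) ↔ (x ≠ 0) := by
  unfold pvAf at h; by_cases hy : y = 0 <;> by_cases hx : x = 0 <;> simp_all

lemma pvAf_eq_pvAf_iff (x z : Int) :
    (pvAf z = pvAf x) ↔ (decide (z ≠ 0) == decide (x ≠ 0)) = true := by
  unfold pvAf; by_cases hz : z = 0 <;> by_cases hx : x = 0 <;> simp [hz, hx]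

lemma pv_drop_cons {a : List Int} {s : Nat} {x : Int} {u : List Int}
    (h : a.drop s = x :: u) : a.drop (s + 1) = u := by
  have := congrArg (List.drop 1) h
  simpa [List.drop_drop, Nat.add_comm] using this

lemma pv_len_of_drop {a : List Int} {s : Nat} {x : Int} {u : List Int}
    (h : a.drop s = x :: u) : a.length = s + 1 + u.length := by
  have hs : s ≤ a.length := by
    by_contra hlt
    have : a.drop s = [] := List.drop_eq_nil_of_le (by omega)
    simp [this] at h
  have := congrArg List.length h
  simp [List.length_drop] at this
  omega

lemma pv_getD_of_drop {a : List Int} {s : Nat} {x : Int} {u : List Int}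
    (h : a.drop s = x :: u) : (a.map pvAf).getD s 0 = pvAf x := by
  have hx : a[s]? = some x := by
    have := congrArg (fun l => l[0]?) h
    simpa [List.getElem?_drop] using this
  simp [List.getD_eq_getElem?_getD, List.getElem?_map, hx]

lemma pv_dropWhile_head {p : Int → Bool} :
    ∀ (l : List Int) (z : Int) (u : List Int), l.dropWhile p = z :: u → p z = false := by
  intro l
  induction l with
  | nil => intro z u h; simp at h
  | cons y t ih =>
    intro z u h
    by_cases hy : p y
    · exact ih z u (by simpa [List.dropWhile_cons, hy] using h)
    · rw [List.dropWhile_cons] at h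
      simp [hy] at h
      rw [← h.1]; simpa using hy

-- folding A's body across one maximal run: one append at the run's last index
lemma pv_run_fold (a : List Int) (st : Nat) :
    ∀ (r : List Int) (x : Int) (s : Nat) (tl : List Int) (acc : List (Int × Int)),
    a.drop s = x :: (r ++ tl) →
    (∀ z ∈ r, pvAf z = pvAf x) →
    (tl = [] ∨ ∃ z u, tl = z :: u ∧ pvAf z ≠ pvAf x) →
    (a.map pvAf).getD st 0 = pvAf x →
    (List.range' s (1 + r.length)).foldl (fun acc2 (k : Nat) => pvAbody (a.map pvAf) acc2 (k : Int)) (acc, (st : Int))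
      = ((if x ≠ 0 then acc ++ [((st : Int), ((s + r.length : Nat) : Int))] else acc),
         ((s + 1 + r.length : Nat) : Int)) := by
  intro r
  induction r with
  | nil =>
    intro x s tl acc hdrop _ htl hst
    have hx : (a.map pvAf).getD s 0 = pvAf x := pv_getD_of_drop (by simpa using hdrop)
    have hlen : a.length = s + 1 + tl.length := pv_len_of_drop (by simpa using hdrop)
    have hcond : ((s : Int) + 1 = ((a.map pvAf).length : Int)) ∨
        PySem.List.pyGetD (a.map pvAf) (s : Int) 0 ≠ PySem.List.pyGetD (a.map pvAf) ((s : Int) + 1) 0 := by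
      rcases htl with h0 | ⟨z, u, hz, hne⟩
      · left
        simp only [List.length_map, hlen, h0, List.length_nil]
        push_cast
        ring
      · right
        have hdz : a.drop (s + 1) = z :: u := by
          rw [hz] at hdrop; exact pv_drop_cons (by simpa using hdrop)
        have hz' : (a.map pvAf).getD (s + 1) 0 = pvAf z := pv_getD_of_drop hdz
        have : ((s : Int) + 1) = ((s + 1 : Nat) : Int) := by push_cast; ring
        rw [this]
        simp only [PySem.List.pyGetD_natCast]
        rw [hx, hz']
        exact fun h => hne h.symm
    have hone : 1 + ([] : List Int).length = 1 := rfl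
    rw [hone, List.range'_one]
    simp only [List.foldl_cons, List.foldl_nil]
    unfold pvAbody
    rw [if_pos hcond]
    simp only [PySem.List.pyGetD_natCast, hst]
    have h1 : ((s + ([] : List Int).length : Nat) : Int) = (s : Int) := by push_cast; simp
    have h2 : ((s + 1 + ([] : List Int).length : Nat) : Int) = (s : Int) + 1 := by push_cast; simp
    rw [h1, h2]
    by_cases hxx : x = 0 <;> simp [hxx, pvAf]
  | cons y r' ih =>
    intro x s tl acc hdrop hall htl hst
    have hy : pvAf y = pvAf x := hall y (by simp)
    have hx : (a.map pvAf).getD s 0 = pvAf x := pv_getD_of_drop hdrop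
    have hdy : a.drop (s + 1) = y :: (r' ++ tl) := pv_drop_cons (by simpa using hdrop)
    have hy' : (a.map pvAf).getD (s + 1) 0 = pvAf y := pv_getD_of_drop hdy
    have hlen : a.length = s + 1 + (y :: (r' ++ tl)).length := pv_len_of_drop hdrop
    have hcond : ¬ (((s : Int) + 1 = ((a.map pvAf).length : Int)) ∨
        PySem.List.pyGetD (a.map pvAf) (s : Int) 0 ≠ PySem.List.pyGetD (a.map pvAf) ((s : Int) + 1) 0) := by
      push Not
      constructor
      · simp only [List.length_map, hlen, List.length_cons]
        push_cast
        omega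
      · have hc : ((s : Int) + 1) = ((s + 1 : Nat) : Int) := by push_cast; ring
        rw [hc]
        simp only [PySem.List.pyGetD_natCast, hx, hy', hy]
    have hstep : List.range' s (1 + (y :: r').length) = s :: List.range' (s + 1) (1 + r'.length) := by
      have : 1 + (y :: r').length = (1 + r'.length) + 1 := by
        simp only [List.length_cons]; omega
      rw [this, List.range'_succ]
    rw [hstep]
    simp only [List.foldl_cons]
    have hbody : pvAbody (a.map pvAf) (acc, (st : Int)) (s : Int) = (acc, (st : Int)) := by
      unfold pvAbody; rw [if_neg hcond]
    rw [hbody]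
    have := ih y (s + 1) tl acc hdy
      (fun z hz => (hall z (by simp [hz])).trans hy.symm)
      (by rcases htl with h0 | ⟨z, u, hz, hne⟩
          · exact Or.inl h0
          · exact Or.inr ⟨z, u, hz, by rw [hy]; exact hne⟩)
      (by rw [hst, hy])
    rw [this]
    have hif : (y ≠ 0) = (x ≠ 0) := by
      rw [eq_iff_iff]; exact pvAf_eq_imp_ne_iff hy
    simp only [hif]
    have h1 : s + 1 + r'.length = s + (y :: r').length := by simp; omega
    have h2 : s + 1 + 1 + r'.length = s + 1 + (y :: r').length := by simp; omega
    rw [h1, h2]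

-- main induction for A: A's index fold from position s equals the run recursion on the suffix
lemma pv_main (a : List Int) :
    ∀ (n : Nat) (xs : List Int) (s : Nat) (acc : List (Int × Int)),
    xs.length ≤ n →
    a.drop s = xs →
    ((List.range' s (a.length - s)).foldl (fun st (k : Nat) => pvAbody (a.map pvAf) st (k : Int)) (acc, (s : Int))).1
      = acc ++ pvRunGo xs (s : Int) := by
  intro n
  induction n with
  | zero =>
    intro xs s acc hn hdrop
    have hxs : xs = [] := List.eq_nil_of_length_eq_zero (by omega)
    subst hxs
    have : a.length ≤ s := by
      by_contra h
      have := congrArg List.length hdrop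
      simp [List.length_drop] at this
      omega
    have h0 : a.length - s = 0 := by omega
    rw [pvRunGo]
    simp [h0]
  | succ n ih =>
    intro xs s acc hn hdrop
    cases xs with
    | nil =>
      have : a.length ≤ s := by
        by_contra h
        have := congrArg List.length hdrop
        simp [List.length_drop] at this
        omega
      have h0 : a.length - s = 0 := by omega
      rw [pvRunGo]
      simp [h0]
    | cons x rest =>
      set p : Int → Bool := fun y => decide (y ≠ 0) == decide (x ≠ 0) with hp
      have hsplit : rest = rest.takeWhile p ++ rest.dropWhile p := (List.takeWhile_append_dropWhile).symm
      set r := rest.takeWhile p with hr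
      set tl := rest.dropWhile p with htl
      have hdrop' : a.drop s = x :: (r ++ tl) := by rw [hdrop]; rw [← hsplit]
      have hall : ∀ z ∈ r, pvAf z = pvAf x := by
        intro z hz
        have hpz : p z = true := List.mem_takeWhile_imp (by rw [← hr]; exact hz)
        rw [hp] at hpz
        exact (pvAf_eq_pvAf_iff x z).mpr hpz
      have htlc : tl = [] ∨ ∃ z u, tl = z :: u ∧ pvAf z ≠ pvAf x := by
        cases htl_case : tl with
        | nil => exact Or.inl rfl
        | cons z u =>
          refine Or.inr ⟨z, u, rfl, ?_⟩
          have hpz : p z = false := pv_dropWhile_head rest z u (htl.symm.trans htl_case)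
          have hpz' : (decide (z ≠ 0) == decide (x ≠ 0)) = false := hpz
          intro hcontra
          rw [pvAf_eq_pvAf_iff] at hcontra
          rw [hcontra] at hpz'
          cases hpz'
      have hlen : a.length = s + 1 + (r.length + tl.length) := by
        have := pv_len_of_drop hdrop'
        simpa using this
      have hjle : s + 1 + r.length ≤ a.length := by omega
      have hrange : List.range' s (a.length - s) =
          List.range' s (1 + r.length) ++ List.range' (s + (1 + r.length)) (a.length - (s + 1 + r.length)) := by
        rw [List.range'_append_1]
        congr 1
        omega
      rw [hrange, List.foldl_append]
      rw [pv_run_fold a s r x s tl acc hdrop' hall htlc (pv_getD_of_drop hdrop')]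
      have hdtl : a.drop (s + 1 + r.length) = tl := by
        have h1 : a.drop (s + 1) = r ++ tl := pv_drop_cons hdrop'
        have := congrArg (List.drop r.length) h1
        simpa [List.drop_drop, Nat.add_comm, Nat.add_assoc, Nat.add_left_comm] using this
      have htllen : tl.length ≤ n := by
        have hr1 : r.length + tl.length = rest.length := by
          have := congrArg List.length hsplit; simp at this; omega
        simp at hn; omega
      have hIH := ih tl (s + 1 + r.length)
        (if x ≠ 0 then acc ++ [((s : Int), ((s + r.length : Nat) : Int))] else acc)
        htllen hdtl
      have harg : s + (1 + r.length) = s + 1 + r.length := by omega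
      rw [harg]
      have hsub : a.length - (s + 1 + r.length) = tl.length := by omega
      rw [hsub] at hIH ⊢
      rw [hIH]
      show _ = acc ++ pvRunGo (x :: rest) (s : Int)
      rw [pvRunGo]
      simp only [← hp, ← hr, ← htl]
      have hj : (s : Int) + 1 + (r.length : Int) = ((s + 1 + r.length : Nat) : Int) := by push_cast; ring
      rw [hj]
      have hj1 : ((s + 1 + r.length : Nat) : Int) - 1 = ((s + r.length : Nat) : Int) := by push_cast; ring
      rw [hj1]
      split <;> simp

-- ===== B-side lemmas =====

-- structural form of the non-zero index list starting at offset s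
def pvNzFrom (xs : List Int) (s : Int) : List Int :=
  match xs with
  | [] => []
  | x :: t => if x ≠ 0 then s :: pvNzFrom t (s + 1) else pvNzFrom t (s + 1)

lemma pv_nz_eq : ∀ (a : List Int) (k : Int),
    ((PySem.List.enumerate a k).filter (fun p => decide (p.2 ≠ 0))).map Prod.fst = pvNzFrom a k := by
  intro a
  induction a with
  | nil => intro k; simp [PySem.List.enumerate_nil, pvNzFrom]
  | cons x t ih =>
    intro k
    rw [PySem.List.enumerate_cons, pvNzFrom]
    by_cases hx : x = 0 <;> simp [hx] <;> simpa using ih (k + 1)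

def pvConsec (s : Int) : Nat → List Int
  | 0 => []
  | n + 1 => s :: pvConsec (s + 1) n

lemma pv_nzFrom_nonzero : ∀ (r : List Int) (tl : List Int) (s : Int), (∀ y ∈ r, y ≠ 0) →
    pvNzFrom (r ++ tl) s = pvConsec s r.length ++ pvNzFrom tl (s + r.length) := by
  intro r
  induction r with
  | nil => intro tl s _; simp [pvConsec]
  | cons y t ih =>
    intro tl s hall
    have hy : y ≠ 0 := hall y (by simp)
    have hih := ih tl (s + 1) (fun z hz => hall z (by simp [hz]))
    rw [List.cons_append, pvNzFrom, if_pos hy, hih]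
    have hoff : s + 1 + (t.length : Int) = s + (((y :: t).length : Nat) : Int) := by
      simp only [List.length_cons]; push_cast; ring
    rw [hoff]
    simp [pvConsec]

lemma pv_nzFrom_zero : ∀ (r : List Int) (tl : List Int) (s : Int), (∀ y ∈ r, y = 0) →
    pvNzFrom (r ++ tl) s = pvNzFrom tl (s + r.length) := by
  intro r
  induction r with
  | nil => intro tl s _; simp
  | cons y t ih =>
    intro tl s hall
    have hy : y = 0 := hall y (by simp)
    subst hy
    rw [List.cons_append, pvNzFrom]
    rw [if_neg (by simp), ih tl (s + 1) (fun z hz => hall z (by simp [hz]))]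
    have hoff : s + 1 + (t.length : Int) = s + ((((0 : Int) :: t).length : Nat) : Int) := by
      simp only [List.length_cons]; push_cast; ring
    rw [hoff]

-- folding B's loop body over a block of consecutive indices only extends prev
lemma pv_fold_consec : ∀ (n : Nat) (p s0 : Int) (acc : List (Int × Int)),
    (pvConsec (p + 1) n).foldl pvBstep (acc, some (s0, p)) = (acc, some (s0, p + (n : Int))) := by
  intro n
  induction n with
  | zero => intro p s0 acc; simp [pvConsec]
  | succ n ih =>
    intro p s0 acc
    rw [pvConsec]
    simp only [List.foldl_cons]
    have hstep : pvBstep (acc, some (s0, p)) (p + 1) = (acc, some (s0, p + 1)) := by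
      simp [pvBstep]
    have hoff : p + 1 + (n : Int) = p + ((n + 1 : Nat) : Int) := by push_cast; ring
    rw [hstep, ih (p + 1) s0 acc, hoff]

-- main induction for B: folding the gap-split loop over the non-zero index list
-- of a suffix equals the run recursion, provided prev cannot collide with the
-- next non-zero index (prev+1 < s, or prev+1 = s but the suffix starts with 0)
lemma pv_bmain : ∀ (n : Nat) (xs : List Int) (s : Int) (acc : List (Int × Int))
    (ps : Option (Int × Int)),
    xs.length ≤ n →
    (ps = none ∨ ∃ s0 p, ps = some (s0, p) ∧ (p + 1 < s ∨ (p + 1 = s ∧ xs.head? = some 0))) →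
    pvFlush ((pvNzFrom xs s).foldl pvBstep (acc, ps)) = pvFlush (acc, ps) ++ pvRunGo xs s := by
  intro n
  induction n with
  | zero =>
    intro xs s acc ps hn _
    have hxs : xs = [] := List.eq_nil_of_length_eq_zero (by omega)
    subst hxs
    rw [pvRunGo]
    simp [pvNzFrom]
  | succ n ih =>
    intro xs s acc ps hn hinv
    cases xs with
    | nil =>
      rw [pvRunGo]
      simp [pvNzFrom]
    | cons x rest =>
      set p : Int → Bool := fun y => decide (y ≠ 0) == decide (x ≠ 0) with hp
      have hsplit : rest = rest.takeWhile p ++ rest.dropWhile p := (List.takeWhile_append_dropWhile).symm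
      set r := rest.takeWhile p with hr
      set tl := rest.dropWhile p with htl
      have hrest : (x :: rest) = (x :: r) ++ tl := by
        simp only [List.cons_append]
        rw [← hsplit]
      have htltl : tl.length ≤ n := by
        have h1 : tl.length ≤ rest.length := List.length_dropWhile_le _ _
        simp at hn; omega
      have hRG : pvRunGo (x :: rest) s =
          if x ≠ 0 then (s, (s + 1 + (r.length : Int)) - 1) :: pvRunGo tl (s + 1 + (r.length : Int))
          else pvRunGo tl (s + 1 + (r.length : Int)) := by
        rw [pvRunGo]
      have hcastlen : s + (((x :: r).length : Nat) : Int) = s + 1 + (r.length : Int) := by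
        simp only [List.length_cons]; push_cast; ring
      by_cases hx : x = 0
      · -- zero run: contributes no indices, pvRunGo skips it
        have hallz : ∀ y ∈ (x :: r), y = 0 := by
          intro y hy
          rcases List.mem_cons.mp hy with h | h
          · omega
          · have hpy : p y = true := List.mem_takeWhile_imp (by rw [← hr]; exact h)
            rw [hp] at hpy
            simp [hx] at hpy
            exact hpy
        rw [hrest, pv_nzFrom_zero (x :: r) tl s hallz]
        have hinv' : ps = none ∨ ∃ s0 q, ps = some (s0, q) ∧
            (q + 1 < s + (((x :: r).length : Nat) : Int) ∨
             (q + 1 = s + (((x :: r).length : Nat) : Int) ∧ tl.head? = some 0)) := by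
          rcases hinv with h | ⟨s0, q, hps, hc⟩
          · exact Or.inl h
          · refine Or.inr ⟨s0, q, hps, Or.inl ?_⟩
            rw [hcastlen]
            have : (0 : Int) ≤ (r.length : Int) := by positivity
            rcases hc with h1 | ⟨h1, _⟩ <;> omega
        rw [ih tl (s + (((x :: r).length : Nat) : Int)) acc ps htltl hinv']
        rw [← hrest, hRG, if_neg (by simpa using hx), hcastlen]
      · -- non-zero run: one consecutive block of indices, then a guaranteed gap
        have hallnz : ∀ y ∈ (x :: r), y ≠ 0 := by
          intro y hy
          rcases List.mem_cons.mp hy with h | h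
          · subst h; exact hx
          · have hpy : p y = true := List.mem_takeWhile_imp (by rw [← hr]; exact h)
            rw [hp] at hpy
            simp [hx] at hpy
            exact hpy
        rw [hrest, pv_nzFrom_nonzero (x :: r) tl s hallnz]
        have hblock : pvConsec s (x :: r).length = s :: pvConsec (s + 1) r.length := by
          simp [pvConsec]
        rw [hblock, List.foldl_append]
        simp only [List.foldl_cons]
        -- first index s: a gap (or fresh start) — flushes the pending pair
        have hfirst : pvBstep (acc, ps) s = (pvFlush (acc, ps), some (s, s)) := by
          rcases hinv with h | ⟨s0, q, hps, hc⟩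
          · subst h; simp [pvBstep, pvFlush]
          · subst hps
            have hgap : s ≠ q + 1 := by
              rcases hc with h1 | ⟨_, h2⟩
              · omega
              · simp at h2
                omega
            simp [pvBstep, pvFlush, hgap]
        rw [hfirst, pv_fold_consec r.length s s (pvFlush (acc, ps))]
        rw [← hrest, hRG, if_pos hx]
        cases htl_case : tl with
        | nil =>
          simp only [pvNzFrom, List.foldl_nil, pvFlush, pvRunGo]
          simp
          omega
        | cons z u =>
          have hz0 : z = 0 := by
            have hpz : p z = false := pv_dropWhile_head rest z u (htl.symm.trans htl_case)
            rw [hp] at hpz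
            simp [hx] at hpz
            exact hpz
          have hinv' : (some (s, s + (r.length : Int)) : Option (Int × Int)) = none ∨
              ∃ s0 q, (some (s, s + (r.length : Int)) : Option (Int × Int)) = some (s0, q) ∧
              (q + 1 < s + ((((x :: r)).length : Nat) : Int) ∨
               (q + 1 = s + ((((x :: r)).length : Nat) : Int) ∧ (z :: u).head? = some 0)) := by
            refine Or.inr ⟨s, s + (r.length : Int), rfl, Or.inr ⟨?_, ?_⟩⟩
            · rw [hcastlen]; ring
            · rw [hz0]; rfl
          have hlen' : (z :: u).length ≤ n := htl_case ▸ htltl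
          have hfin := ih (z :: u) (s + (((x :: r).length : Nat) : Int)) (pvFlush (acc, ps))
            (some (s, s + (r.length : Int))) hlen' hinv'
          rw [hfin, hcastlen]
          simp [pvFlush]
          omega
-- ===== VERDICT (by name: the statement is the Claim_ definition above) =====
theorem get_nonzero_range_spec : Claim_equal_get_nonzero_range := by
  intro a _
  unfold Spec_get_nonzero_range get_nonzero_range get_nonzero_range_alt
  simp only [List.length_map]
  rw [PySem.List.pyRange_zero_nat, List.foldl_map]
  have hA := pv_main a a.length a 0 [] (le_refl _) (by simp)
  have hB := pv_bmain a.length a 0 [] none (le_refl _) (Or.inl rfl)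
  rw [pv_nz_eq a 0, hB]
  simpa [List.range_eq_range', pvFlush] using hA
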